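-- pv_equiv track=rewrite | github.com/KeshavMajithia/mic | app_smart_fixed.py | _is_country_variation
-- ===== SOURCE A (Python) =====
-- def _is_country_variation(country_upper, location_upper):
--     """Check for common country name variations"""
--     variations = {
--         'USA': ['UNITED STATES', 'AMERICA', 'US'],
--         'UK': ['UNITED KINGDOM', 'BRITAIN', 'ENGLAND'],
--         'UAE': ['UNITED ARAB EMIRATES'],
--         'CYPRUS': ['EUROPE'],  # Cyprus might be under Europe
--         'RUSSIA': ['RUSSIAN FEDERATION'],
--         'SOUTH KOREA': ['KOREA'],
--         'NORTH KOREA': ['KOREA']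
--     }
--
--     # Check if country has known variations
--     if country_upper in variations:
--         for variation in variations[country_upper]:
--             if variation in location_upper or location_upper in variation:
--                 return True
--
--     # Check reverse mapping
--     for main_country, var_list in variations.items():
--         if country_upper in var_list:
--             if main_country in location_upper or location_upper in main_country:
--                 return True
--
--     return False
-- ===== SOURCE B (Python) =====
-- # Single symmetric adjacency map: one lookup + one scan replaces the two forward/reverse loops.
-- _COUNTRY_ADJACENCY = {
--     'USA': ['UNITED STATES', 'AMERICA', 'US'],
--     'UK': ['UNITED KINGDOM', 'BRITAIN', 'ENGLAND'],
--     'UAE': ['UNITED ARAB EMIRATES'],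
--     'CYPRUS': ['EUROPE'],
--     'RUSSIA': ['RUSSIAN FEDERATION'],
--     'SOUTH KOREA': ['KOREA'],
--     'NORTH KOREA': ['KOREA'],
--     'UNITED STATES': ['USA'],
--     'AMERICA': ['USA'],
--     'US': ['USA'],
--     'UNITED KINGDOM': ['UK'],
--     'BRITAIN': ['UK'],
--     'ENGLAND': ['UK'],
--     'UNITED ARAB EMIRATES': ['UAE'],
--     'EUROPE': ['CYPRUS'],
--     'RUSSIAN FEDERATION': ['RUSSIA'],
--     'KOREA': ['SOUTH KOREA', 'NORTH KOREA'],
-- }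
--
-- def _is_country_variation(country_upper, location_upper):
--     """Check for common country name variations"""
--     return any(n in location_upper or location_upper in n
--                for n in _COUNTRY_ADJACENCY.get(country_upper, []))
-- ===== Notes on version B (the rewrite author's own statement) =====
-- stated objective: simpler
-- what changed: Replaced the forward loop plus reverse scan over the whole dict by a single precomputed symmetric adjacency dict: one lookup and one scan over the neighbors of country_upper.
import Mathlib
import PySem

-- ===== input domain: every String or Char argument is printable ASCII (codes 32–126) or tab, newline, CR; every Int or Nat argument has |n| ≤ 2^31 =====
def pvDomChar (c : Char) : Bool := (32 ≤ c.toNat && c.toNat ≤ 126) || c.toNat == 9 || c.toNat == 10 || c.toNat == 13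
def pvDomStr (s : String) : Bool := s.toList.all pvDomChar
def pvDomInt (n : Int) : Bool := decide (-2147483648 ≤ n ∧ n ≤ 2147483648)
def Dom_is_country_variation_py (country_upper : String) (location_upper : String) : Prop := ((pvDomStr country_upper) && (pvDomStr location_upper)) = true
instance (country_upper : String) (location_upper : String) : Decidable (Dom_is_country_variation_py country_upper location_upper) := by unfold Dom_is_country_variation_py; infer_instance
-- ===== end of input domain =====

-- B replaces A's forward loop plus reverse scan over every dict entry by one precomputed
-- symmetric adjacency dict: a single lookup and one scan over the neighbors (objective: simpler).

-- ===== PORT A =====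
def is_country_variation_py (country_upper : String) (location_upper : String) : Bool :=
  let variations : PySem.Dict String (List String) := PySem.Dict.mk [
    ("USA", ["UNITED STATES", "AMERICA", "US"]),
    ("UK", ["UNITED KINGDOM", "BRITAIN", "ENGLAND"]),
    ("UAE", ["UNITED ARAB EMIRATES"]),
    ("CYPRUS", ["EUROPE"]),
    ("RUSSIA", ["RUSSIAN FEDERATION"]),
    ("SOUTH KOREA", ["KOREA"]),
    ("NORTH KOREA", ["KOREA"])]
  -- 'if country_upper in variations: for variation in …: if … : return True'
  let forward : Bool :=
    if variations.contains country_upper then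
      ((variations.get? country_upper).getD []).any
        (fun variation => PySem.Str.isIn variation location_upper || PySem.Str.isIn location_upper variation)
    else false
  if forward then true
  else
    -- 'for main_country, var_list in variations.items(): if country_upper in var_list: if … : return True'
    variations.items.any (fun p =>
      p.2.contains country_upper &&
        (PySem.Str.isIn p.1 location_upper || PySem.Str.isIn location_upper p.1))

-- ===== PORT B =====
def is_country_variation_py_alt (country_upper : String) (location_upper : String) : Bool :=
  let adjacency : PySem.Dict String (List String) := PySem.Dict.mk [
    ("USA", ["UNITED STATES", "AMERICA", "US"]),
    ("UK", ["UNITED KINGDOM", "BRITAIN", "ENGLAND"]),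
    ("UAE", ["UNITED ARAB EMIRATES"]),
    ("CYPRUS", ["EUROPE"]),
    ("RUSSIA", ["RUSSIAN FEDERATION"]),
    ("SOUTH KOREA", ["KOREA"]),
    ("NORTH KOREA", ["KOREA"]),
    ("UNITED STATES", ["USA"]),
    ("AMERICA", ["USA"]),
    ("US", ["USA"]),
    ("UNITED KINGDOM", ["UK"]),
    ("BRITAIN", ["UK"]),
    ("ENGLAND", ["UK"]),
    ("UNITED ARAB EMIRATES", ["UAE"]),
    ("EUROPE", ["CYPRUS"]),
    ("RUSSIAN FEDERATION", ["RUSSIA"]),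
    ("KOREA", ["SOUTH KOREA", "NORTH KOREA"])]
  (adjacency.getD country_upper []).any
    (fun n => PySem.Str.isIn n location_upper || PySem.Str.isIn location_upper n)

-- ===== PRECONDITION & SPEC =====
def Spec_is_country_variation_py (country_upper : String) (location_upper : String) (out : Bool) : Prop := out = is_country_variation_py_alt country_upper location_upper
instance (country_upper : String) (location_upper : String) (out : Bool) : Decidable (Spec_is_country_variation_py country_upper location_upper out) := by unfold Spec_is_country_variation_py; infer_instance

-- ===== CLAIM (what is proved, stated in full; the proofs are below) =====
def Claim_equal_is_country_variation_py : Prop := ∀ (country_upper : String) (location_upper : String), Dom_is_country_variation_py country_upper location_upper → Spec_is_country_variation_py country_upper location_upper (is_country_variation_py country_upper location_upper)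

-- ===== LEMMAS AND PROOFS =====

-- ===== VERDICT (by name: the statement is the Claim_ definition above) =====
theorem is_country_variation_py_spec : Claim_equal_is_country_variation_py := by
  intro c l _
  unfold Spec_is_country_variation_py
  by_cases h0 : c = "USA"
  · subst h0; simp [is_country_variation_py, is_country_variation_py_alt,
      PySem.Dict.getD_eq_get?_getD, PySem.Dict.get?_mk_cons, PySem.Dict.contains_mk]
  by_cases h1 : c = "UK"
  · subst h1; simp [is_country_variation_py, is_country_variation_py_alt,
      PySem.Dict.getD_eq_get?_getD, PySem.Dict.get?_mk_cons, PySem.Dict.contains_mk]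
  by_cases h2 : c = "UAE"
  · subst h2; simp [is_country_variation_py, is_country_variation_py_alt,
      PySem.Dict.getD_eq_get?_getD, PySem.Dict.get?_mk_cons, PySem.Dict.contains_mk]
  by_cases h3 : c = "CYPRUS"
  · subst h3; simp [is_country_variation_py, is_country_variation_py_alt,
      PySem.Dict.getD_eq_get?_getD, PySem.Dict.get?_mk_cons, PySem.Dict.contains_mk]
  by_cases h4 : c = "RUSSIA"
  · subst h4; simp [is_country_variation_py, is_country_variation_py_alt,
      PySem.Dict.getD_eq_get?_getD, PySem.Dict.get?_mk_cons, PySem.Dict.contains_mk]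
  by_cases h5 : c = "SOUTH KOREA"
  · subst h5; simp [is_country_variation_py, is_country_variation_py_alt,
      PySem.Dict.getD_eq_get?_getD, PySem.Dict.get?_mk_cons, PySem.Dict.contains_mk]
  by_cases h6 : c = "NORTH KOREA"
  · subst h6; simp [is_country_variation_py, is_country_variation_py_alt,
      PySem.Dict.getD_eq_get?_getD, PySem.Dict.get?_mk_cons, PySem.Dict.contains_mk]
  by_cases h7 : c = "UNITED STATES"
  · subst h7; simp [is_country_variation_py, is_country_variation_py_alt,
      PySem.Dict.getD_eq_get?_getD, PySem.Dict.get?_mk_cons, PySem.Dict.contains_mk]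
  by_cases h8 : c = "AMERICA"
  · subst h8; simp [is_country_variation_py, is_country_variation_py_alt,
      PySem.Dict.getD_eq_get?_getD, PySem.Dict.get?_mk_cons, PySem.Dict.contains_mk]
  by_cases h9 : c = "US"
  · subst h9; simp [is_country_variation_py, is_country_variation_py_alt,
      PySem.Dict.getD_eq_get?_getD, PySem.Dict.get?_mk_cons, PySem.Dict.contains_mk]
  by_cases h10 : c = "UNITED KINGDOM"
  · subst h10; simp [is_country_variation_py, is_country_variation_py_alt,
      PySem.Dict.getD_eq_get?_getD, PySem.Dict.get?_mk_cons, PySem.Dict.contains_mk]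
  by_cases h11 : c = "BRITAIN"
  · subst h11; simp [is_country_variation_py, is_country_variation_py_alt,
      PySem.Dict.getD_eq_get?_getD, PySem.Dict.get?_mk_cons, PySem.Dict.contains_mk]
  by_cases h12 : c = "ENGLAND"
  · subst h12; simp [is_country_variation_py, is_country_variation_py_alt,
      PySem.Dict.getD_eq_get?_getD, PySem.Dict.get?_mk_cons, PySem.Dict.contains_mk]
  by_cases h13 : c = "UNITED ARAB EMIRATES"
  · subst h13; simp [is_country_variation_py, is_country_variation_py_alt,
      PySem.Dict.getD_eq_get?_getD, PySem.Dict.get?_mk_cons, PySem.Dict.contains_mk]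
  by_cases h14 : c = "EUROPE"
  · subst h14; simp [is_country_variation_py, is_country_variation_py_alt,
      PySem.Dict.getD_eq_get?_getD, PySem.Dict.get?_mk_cons, PySem.Dict.contains_mk]
  by_cases h15 : c = "RUSSIAN FEDERATION"
  · subst h15; simp [is_country_variation_py, is_country_variation_py_alt,
      PySem.Dict.getD_eq_get?_getD, PySem.Dict.get?_mk_cons, PySem.Dict.contains_mk]
  by_cases h16 : c = "KOREA"
  · subst h16; simp [is_country_variation_py, is_country_variation_py_alt,
      PySem.Dict.getD_eq_get?_getD, PySem.Dict.get?_mk_cons, PySem.Dict.contains_mk]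
  simp [is_country_variation_py, is_country_variation_py_alt,
      PySem.Dict.getD_eq_get?_getD, PySem.Dict.get?_mk_cons, PySem.Dict.contains_mk, PySem.Dict.get?, Ne.symm h0, Ne.symm h1, Ne.symm h2, Ne.symm h3, Ne.symm h4, Ne.symm h5, Ne.symm h6, Ne.symm h7, Ne.symm h8, Ne.symm h9, Ne.symm h10, Ne.symm h11, Ne.symm h12, Ne.symm h13, Ne.symm h14, Ne.symm h15, Ne.symm h16]
  tauto
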